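-- pv_equiv track=rewrite | github.com/simiooo/Drova---Forsaken-Kin-Auto-Translate-Tool | translate_loc.py | split_near_brace
-- ===== SOURCE A (Python) =====
-- def split_near_brace(text, step=300):
--     chunks = []
--     start = 0
--     n = len(text)
--     while start < n:
--         end_candidate = min(start + step, n)
--         if end_candidate == n:
--             chunks.append(text[start:])
--             break
--         split_pos = text.rfind('}', start, end_candidate + 1)
--         if split_pos == -1:
--             split_pos = end_candidate
--         chunks.append(text[start:split_pos + 1])
--         start = split_pos + 1
--     return chunks
-- ===== SOURCE B (Python) =====
-- def split_near_brace(text, step=300):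
--     # Precompute, in one pass, last[i] = index of the last '}' at or before i (-1 if none),
--     # then cut chunks with O(1) lookups instead of a windowed rfind scan per chunk.
--     n = len(text)
--     last = []
--     prev = -1
--     for i, c in enumerate(text):
--         if c == '}':
--             prev = i
--         last.append(prev)
--     chunks = []
--     start = 0
--     while start < n:
--         if start + step >= n:
--             chunks.append(text[start:])
--             break
--         p = last[start + step]
--         split_pos = p if p >= start else start + step
--         chunks.append(text[start:split_pos + 1])
--         start = split_pos + 1
--     return chunks
-- ===== Notes on version B (the rewrite author's own statement) =====
-- stated objective: alternative
-- what changed: B precomputes in one pass an array last[i] = index of the last closing brace at or before i and cuts each chunk with an O(1) lookup, instead of A's per-chunk backwards rfind scan over the window.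
import Mathlib
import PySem

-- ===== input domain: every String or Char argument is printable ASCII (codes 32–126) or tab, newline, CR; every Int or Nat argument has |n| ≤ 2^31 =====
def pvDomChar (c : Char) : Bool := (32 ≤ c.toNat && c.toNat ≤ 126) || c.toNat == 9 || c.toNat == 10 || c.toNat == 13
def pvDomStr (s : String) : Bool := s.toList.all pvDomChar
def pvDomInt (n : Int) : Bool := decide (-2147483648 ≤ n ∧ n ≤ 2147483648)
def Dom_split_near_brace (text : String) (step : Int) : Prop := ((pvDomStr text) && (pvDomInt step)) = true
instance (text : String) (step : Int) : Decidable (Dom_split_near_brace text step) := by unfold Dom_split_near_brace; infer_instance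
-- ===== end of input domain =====

-- B replaces A's per-chunk windowed rfind scan by a one-pass precomputed last-brace index
-- with O(1) lookups per chunk (objective: alternative algorithm; speed not claimed).

-- ===== PORT A =====
-- fuel (text length + 1) only makes the while-loop total; on Pre_ the loop advances start
-- by at least 1 per iteration, so the fuel is never exhausted.
def split_near_brace_loopA (text : String) (step : Int) (fuel : Nat) (start : Int) (chunks : List String) : List String :=
  match fuel with
  | 0 => chunks
  | fuel + 1 =>
    let n : Int := PySem.Str.len text
    if start < n then
      let endc : Int := min (start + step) n
      if endc = n then chunks ++ [PySem.Str.slice text (some start) none]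
      else
        let r := PySem.Str.rfindFrom text "}" start (some (endc + 1))
        let sp := if r = -1 then endc else r
        split_near_brace_loopA text step fuel (sp + 1) (chunks ++ [PySem.Str.slice text (some start) (some (sp + 1))])
    else chunks

def split_near_brace (text : String) (step : Int) : List String :=
  split_near_brace_loopA text step (text.toList.length + 1) 0 []

-- ===== PORT B =====
-- the one-pass build of last[i] = index of last '}' at or before i (-1 if none)
def split_near_brace_altLast (text : String) : List Int :=
  ((PySem.List.enumerate text.toList 0).foldl
    (fun (st : List Int × Int) p =>
      let prev := if p.2 = '}' then p.1 else st.2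
      (st.1 ++ [prev], prev)) ([], -1)).1

-- default -1 of pyGetD is never used on Pre_ (the index is then in range; Python raises only out of range)
def split_near_brace_altLoop (text : String) (last : List Int) (step : Int) (fuel : Nat) (start : Int) (chunks : List String) : List String :=
  match fuel with
  | 0 => chunks
  | fuel + 1 =>
    let n : Int := PySem.Str.len text
    if start < n then
      if n ≤ start + step then chunks ++ [PySem.Str.slice text (some start) none]
      else
        let p := PySem.List.pyGetD last (start + step) (-1)
        let sp := if start ≤ p then p else start + step
        split_near_brace_altLoop text last step fuel (sp + 1) (chunks ++ [PySem.Str.slice text (some start) (some (sp + 1))])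
    else chunks

def split_near_brace_alt (text : String) (step : Int) : List String :=
  split_near_brace_altLoop text (split_near_brace_altLast text) step (text.toList.length + 1) 0 []

-- ===== PRECONDITION & SPEC =====
-- Pre_ excludes only inputs on which A never returns: for step < 0 and nonempty text the
-- while-loop never advances start past n, so Python A diverges (no value is returned there).
def Pre_split_near_brace (text : String) (step : Int) : Prop := text = "" ∨ 0 ≤ step
instance (text : String) (step : Int) : Decidable (Pre_split_near_brace text step) := by unfold Pre_split_near_brace; infer_instance
def pvWitness_split_near_brace : String × Int := ("ab}c{d}e", 3)

def Spec_split_near_brace (text : String) (step : Int) (out : List String) : Prop := out = split_near_brace_alt text step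
instance (text : String) (step : Int) (out : List String) : Decidable (Spec_split_near_brace text step out) := by unfold Spec_split_near_brace; infer_instance

-- ===== CLAIM (what is proved, stated in full; the proofs are below) =====
def Claim_equal_split_near_brace : Prop := ∀ (text : String) (step : Int), Dom_split_near_brace text step → Pre_split_near_brace text step → Spec_split_near_brace text step (split_near_brace text step)

-- ===== LEMMAS AND PROOFS =====

-- last index j ≤ i with s[j] = '}', else -1
def lastLe (s : List Char) : Nat → Int
  | 0 => if s[0]? = some '}' then 0 else -1
  | j+1 => if s[j+1]? = some '}' then ((j : Int)+1) else lastLe s j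

-- functional spec of B's enumerate fold: list of prefix-lasts and the final prev
def mylastP : List Char → Int → Int → List Int × Int
  | [], _, prev => ([], prev)
  | c :: cs, i, prev =>
    let p := if c = '}' then i else prev
    let r := mylastP cs (i+1) p
    (p :: r.1, r.2)

theorem lastLe_zero (s : List Char) : lastLe s 0 = if s[0]? = some '}' then 0 else -1 := rfl
theorem lastLe_succ (s : List Char) (j : Nat) :
    lastLe s (j+1) = if s[j+1]? = some '}' then ((j : Int)+1) else lastLe s j := rfl

theorem neg_one_le_lastLe (s : List Char) (j : Nat) : -1 ≤ lastLe s j := by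
  induction j with
  | zero => unfold lastLe; split <;> omega
  | succ j ih => unfold lastLe; split <;> omega

theorem lastLe_le (s : List Char) (j : Nat) : lastLe s j ≤ j := by
  induction j with
  | zero => unfold lastLe; split <;> omega
  | succ j ih => unfold lastLe; split <;> [omega; exact le_trans ih (by exact_mod_cast Nat.le_succ j)]

theorem lastLe_congr (s₁ s₂ : List Char) (j : Nat) (h : ∀ i, i ≤ j → s₁[i]? = s₂[i]?) :
    lastLe s₁ j = lastLe s₂ j := by
  induction j with
  | zero => unfold lastLe; rw [h 0 (le_refl 0)]
  | succ j ih =>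
    unfold lastLe
    rw [h (j+1) (le_refl _), ih (fun i hi => h i (Nat.le_succ_of_le hi))]

theorem prefix_brace (l : List Char) : (['}'].isPrefixOf l) = (l[0]? == some '}') := by
  cases l with
  | nil => simp [List.isPrefixOf]
  | cons c cs => simp [List.isPrefixOf, BEq.comm]

theorem go_eq_lastLe (s : List Char) (j : Nat) :
    PySem.Chars.rfind.go s ['}'] j = lastLe s j := by
  induction j with
  | zero =>
    rw [PySem.Chars.rfind.go, lastLe_zero, prefix_brace s]
    by_cases hj : s[0]? = some '}' <;> simp [hj]
  | succ j ih =>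
    rw [PySem.Chars.rfind.go, lastLe_succ]
    have h := prefix_brace (s.drop (j+1))
    have h0 : (s.drop (j+1))[0]? = s[j+1]? := by rw [List.getElem?_drop, Nat.add_zero]
    rw [h0] at h
    rw [h]
    by_cases hj : s[j+1]? = some '}' <;> simp [hj, ih]

-- drop-window last vs full-string last
theorem lastLe_drop (s : List Char) (a k : Nat) :
    (if lastLe (s.drop a) k = -1 then (-1 : Int) else (a : Int) + lastLe (s.drop a) k)
      = if (a : Int) ≤ lastLe s (a + k) then lastLe s (a + k) else -1 := by
  induction k with
  | zero =>
    rw [Nat.add_zero]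
    have h0 : (s.drop a)[0]? = s[a]? := by rw [List.getElem?_drop, Nat.add_zero]
    rw [lastLe_zero, h0]
    by_cases hc : s[a]? = some '}'
    · have hsa : lastLe s a = a := by
        cases a with
        | zero => rw [lastLe_zero, if_pos hc]; norm_num
        | succ a' => rw [lastLe_succ, if_pos hc]; push_cast; ring
      rw [if_pos hc, hsa]
      norm_num
    · have hsa : ¬ ((a : Int) ≤ lastLe s a) := by
        cases a with
        | zero => rw [lastLe_zero, if_neg hc]; omega
        | succ a' =>
          rw [lastLe_succ, if_neg hc]
          have := lastLe_le s a'
          push_cast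
          omega
      rw [if_neg hc]
      simp [hsa]
  | succ k ih =>
    have hd : (s.drop a)[k+1]? = s[(a+k)+1]? := by rw [List.getElem?_drop]; rw [Nat.add_assoc]
    have heq : a + (k+1) = (a + k) + 1 := by omega
    rw [heq, lastLe_succ (s.drop a) k, lastLe_succ s (a+k), hd]
    by_cases hc : s[(a+k)+1]? = some '}'
    · rw [if_pos hc, if_pos hc]
      rw [if_neg (by omega : ¬ ((k : Int) + 1) = -1), if_pos (by omega)]
      push_cast; ring
    · rw [if_neg hc, if_neg hc]
      exact ih

theorem rfindFrom_window (s : List Char) (a b : Nat) (hab : a ≤ b) (hb : b < s.length) :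
    PySem.Chars.rfindFrom s ['}'] (a : Int) (some ((b : Int) + 1))
      = if (a : Int) ≤ lastLe s b then lastLe s b else -1 := by
  have hcond1 : ¬ ((s.length : Int) < (b : Int) + 1) := by exact_mod_cast by omega
  have hcond2 : ¬ ((b : Int) + 1 < 0) := by omega
  have hcond3 : ¬ ((a : Int) < 0) := by omega
  have hcond4 : ¬ ((b : Int) + 1 < (a : Int)) := by exact_mod_cast by omega
  simp only [PySem.Chars.rfindFrom, hcond1, hcond2, hcond3, hcond4, if_false,
    PySem.Chars.rfind]
  have htn1 : ((b : Int) + 1).toNat = b + 1 := by omega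
  have htn2 : ((a : Int)).toNat = a := by omega
  rw [htn1, htn2]
  have hlen : (List.drop a (List.take (b+1) s)).length = (b + 1) - a := by
    simp [List.length_drop, List.length_take]
    omega
  set w := List.drop a (List.take (b+1) s) with hw
  have hk : (b + 1) - a = (b - a) + 1 := by omega
  rw [go_eq_lastLe, hlen, hk]
  have hout : w[(b-a)+1]? = none := by
    apply List.getElem?_eq_none
    omega
  have hstep : lastLe w ((b-a)+1) = lastLe w (b-a) := by
    rw [lastLe_succ, hout]; simp
  rw [hstep]
  have hcg : lastLe w (b-a) = lastLe (s.drop a) (b-a) := by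
    apply lastLe_congr
    intro i hi
    rw [hw, List.getElem?_drop, List.getElem?_drop, List.getElem?_take_of_lt (by omega)]
  rw [hcg]
  have := lastLe_drop s a (b - a)
  have hba : a + (b - a) = b := by omega
  rw [hba] at this
  exact this

theorem rfindFrom_window' (s : List Char) (st e : Int) (h0 : 0 ≤ st) (h1 : st ≤ e)
    (h2 : e < (s.length : Int)) :
    PySem.Chars.rfindFrom s ['}'] st (some (e + 1))
      = if st ≤ lastLe s e.toNat then lastLe s e.toNat else -1 := by
  have hw := rfindFrom_window s st.toNat e.toNat (by omega) (by omega)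
  have ha : ((st.toNat : Int)) = st := Int.toNat_of_nonneg h0
  have hb : ((e.toNat : Int)) = e := Int.toNat_of_nonneg (by omega)
  rw [ha, hb] at hw
  exact hw

-- element i of the prefix-last list equals lastLe (shifted by the running offset)
theorem mylastP_getElem (cs : List Char) (i prev : Int) (e : Nat) (he : e < cs.length) :
    (mylastP cs i prev).1[e]? = some (if lastLe cs e = -1 then prev else i + lastLe cs e) := by
  induction cs generalizing i prev e with
  | nil => simp at he
  | cons c cs ih =>
    cases e with
    | zero =>
      by_cases hc : c = '}' <;> simp [mylastP, lastLe, hc]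
    | succ e =>
      have he' : e < cs.length := by simpa using he
      have hcons : lastLe (c :: cs) (e+1)
          = if lastLe cs e = -1 then (if c = '}' then 0 else -1) else lastLe cs e + 1 := by
        clear ih he he'
        induction e with
        | zero =>
          have h0 : (c :: cs)[0+1]? = cs[0]? := rfl
          rw [lastLe_succ, h0, lastLe_zero cs, lastLe_zero (c :: cs)]
          simp only [List.getElem?_cons_zero]
          by_cases h1 : cs[0]? = some '}' <;> by_cases hc : c = '}' <;>
            simp [h1, hc]
        | succ e ihe =>
          have h1' : (c :: cs)[e+1+1]? = cs[e+1]? := rfl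
          rw [lastLe_succ (c :: cs) (e+1), h1', lastLe_succ cs e, ihe]
          by_cases h1 : cs[e+1]? = some '}'
          · rw [if_pos h1, if_pos h1, if_neg (by omega : ¬ ((e : Int) + 1) = -1)]
            push_cast; ring
          · rw [if_neg h1, if_neg h1]
      simp only [mylastP, List.getElem?_cons_succ]
      rw [ih _ _ _ he', hcons]
      have hge := neg_one_le_lastLe cs e
      by_cases hL : lastLe cs e = -1
      · by_cases hc : c = '}' <;> simp [hL, hc]
      · have hne : ¬ (lastLe cs e + 1 = -1) := by omega
        simp [hL, hne]
        ring

theorem altLast_foldl (cs : List Char) (i prev : Int) (s0 : List Int) :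
    ((PySem.List.enumerate cs i).foldl
      (fun (st : List Int × Int) p =>
        let prev := if p.2 = '}' then p.1 else st.2
        (st.1 ++ [prev], prev)) (s0, prev))
      = (s0 ++ (mylastP cs i prev).1, (mylastP cs i prev).2) := by
  induction cs generalizing i prev s0 with
  | nil => simp [PySem.List.enumerate_nil, mylastP]
  | cons c cs ih =>
    rw [PySem.List.enumerate_cons]
    simp only [List.foldl_cons]
    rw [ih]
    simp [mylastP]

theorem altLast_spec (text : String) : split_near_brace_altLast text = (mylastP text.toList 0 (-1)).1 := by
  unfold split_near_brace_altLast
  rw [altLast_foldl]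
  simp

-- the two loops agree step for step
theorem loops_agree (text : String) (step : Int) (hstep : 0 ≤ step) (fuel : Nat) :
    ∀ (start : Int) (chunks : List String), 0 ≤ start →
      split_near_brace_loopA text step fuel start chunks
        = split_near_brace_altLoop text (split_near_brace_altLast text) step fuel start chunks := by
  induction fuel with
  | zero => intro start chunks _; rfl
  | succ fuel ih =>
    intro start chunks hstart
    rw [split_near_brace_loopA, split_near_brace_altLoop]
    by_cases hlt : start < PySem.Str.len text
    · rw [if_pos hlt, if_pos hlt]
      have hn : PySem.Str.len text = (text.toList.length : Int) := by simp
      by_cases hend : PySem.Str.len text ≤ start + step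
      · have hmin : min (start + step) (PySem.Str.len text) = PySem.Str.len text := by omega
        rw [hmin, if_pos rfl, if_pos hend]
      · have hmin : min (start + step) (PySem.Str.len text) = start + step := by omega
        have hne : ¬ (start + step = PySem.Str.len text) := by omega
        rw [hmin, if_neg hne, if_neg hend]
        -- identify the split position on both sides
        have hb : (start + step).toNat < text.toList.length := by
          rw [hn] at hend; omega
        have hab : start.toNat ≤ (start + step).toNat := by omega
        have hca : ((start.toNat : Int)) = start := by omega
        have hcb : ((((start + step).toNat) : Int)) = start + step := by omega
        have hr : PySem.Str.rfindFrom text "}" start (some (start + step + 1))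
            = if start ≤ lastLe text.toList (start + step).toNat
                then lastLe text.toList (start + step).toNat else -1 := by
          rw [PySem.Str.rfindFrom_eq]
          have hq : ("}" : String).toList = ['}'] := rfl
          rw [hq]
          exact rfindFrom_window' text.toList start (start + step) hstart (by omega)
            (by rw [hn] at hend hlt; omega)
        have hp : PySem.List.pyGetD (split_near_brace_altLast text) (start + step) (-1)
            = lastLe text.toList (start + step).toNat := by
          rw [altLast_spec]
          rw [PySem.List.pyGetD_of_nonneg _ _ (by omega : (0:Int) ≤ start + step)]
          rw [List.getD_eq_getElem?_getD]
          rw [mylastP_getElem text.toList 0 (-1) ((start+step).toNat) hb]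
          by_cases hL : lastLe text.toList (start + step).toNat = -1 <;> simp [hL]
        rw [hr, hp]
        set L := lastLe text.toList (start + step).toNat with hLdef
        have hLle : -1 ≤ L := neg_one_le_lastLe _ _
        by_cases hge : start ≤ L
        · have hne1 : ¬ (L = -1) := by omega
          simp only [if_pos hge, if_neg hne1]
          exact ih (L + 1) _ (by omega)
        · simp only [if_neg hge]
          exact ih (start + step + 1) _ (by omega)
    · rw [if_neg hlt, if_neg hlt]

-- ===== VERDICT (by name: the statement is the Claim_ definition above) =====
theorem split_near_brace_spec : Claim_equal_split_near_brace := by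
  intro text step _ hpre
  unfold Spec_split_near_brace
  rcases hpre with hempty | hstep
  · subst hempty
    rfl
  · unfold split_near_brace split_near_brace_alt
    exact loops_agree text step hstep _ 0 [] (le_refl 0)
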